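-- pv_equiv track=rewrite | github.com/pokerdio/generic | e/e-315.py | cost_sam
-- ===== SOURCE A (Python) =====
-- noms = {"0": "1111101",
--         "1": "0101000",
--         "2": "0110111",
--         "3": "0101111",
--         "4": "1101010",
--         "5": "1001111",
--         "6": "1011111",
--         "7": "1101100",
--         "8": "1111111",
--         "9": "1101111"}
--
-- def digital_root(n):
--     return sum((int(a) for a in str(n)))
--
-- def nom_to_str(nom):
--     return "".join(noms[x] for x in str(nom))
--
-- def cost_trans(str1, str2):
--     if len(str1) > len(str2):
--         str2 = "0" * (len(str1) - len(str2)) + str2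
--     elif len(str2) > len(str1):
--         str1 = "0" * (len(str2) - len(str1)) + str1
--     return sum((1 if x != y else 0 for x, y in zip(str1, str2)))
--
-- def cost_sam(n):
--     ret = 0
--     while True:
--         ret += 2 * cost_trans("", nom_to_str(n))
--         n2 = digital_root(n)
--         if n2 < n:
--             n = n2
--         else:
--             break
--     return ret
-- ===== SOURCE B (Python) =====
-- # B: recursive formulation with a precomputed digit -> lit-segment-count table,
-- # replacing A's segment-pattern string construction (nom_to_str) and string-diff (cost_trans).
-- LIT = {"0": 6, "1": 2, "2": 5, "3": 5, "4": 4, "5": 5, "6": 6, "7": 4, "8": 7, "9": 6}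
--
-- def cost_sam(n):
--     s = str(n)
--     cost = 2 * sum(LIT[c] for c in s)
--     n2 = sum(int(c) for c in s)
--     return cost + (cost_sam(n2) if n2 < n else 0)
-- ===== Notes on version B (the rewrite author's own statement) =====
-- stated objective: simpler
-- what changed: B replaces A's per-digit assembly of a seven-character segment-pattern string (nom_to_str) and the padded string-diff pass (cost_trans) with a single precomputed digit-to-lit-segment-count table looked up per character, and recasts the while-loop as recursion on the digital root.
import Mathlib
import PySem

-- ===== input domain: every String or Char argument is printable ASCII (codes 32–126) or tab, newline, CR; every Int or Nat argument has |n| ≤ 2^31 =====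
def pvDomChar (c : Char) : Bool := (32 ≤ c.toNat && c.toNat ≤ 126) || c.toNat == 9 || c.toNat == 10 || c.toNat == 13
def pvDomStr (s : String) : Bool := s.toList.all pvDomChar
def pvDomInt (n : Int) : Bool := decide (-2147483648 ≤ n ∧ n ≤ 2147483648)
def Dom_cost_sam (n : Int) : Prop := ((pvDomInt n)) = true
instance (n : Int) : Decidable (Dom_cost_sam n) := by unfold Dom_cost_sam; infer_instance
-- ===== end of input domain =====

-- B replaces A's seven-segment string assembly plus padded string diff by a precomputed
-- digit→lit-segment-count table and a recursive decomposition (objective: simpler).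
-- Both Pythons raise KeyError on negative n ('-' is not a dict key): Pre_ excludes negatives.

-- ===== PORT A =====
-- noms dict; keys are the 1-character strings Python indexes it with.
def noms : PySem.Dict String String := PySem.Dict.mk
  [("0", "1111101"), ("1", "0101000"), ("2", "0110111"), ("3", "0101111"),
   ("4", "1101010"), ("5", "1001111"), ("6", "1011111"), ("7", "1101100"),
   ("8", "1111111"), ("9", "1101111")]

-- digital_root: sum(int(a) for a in str(n)); int('-') raises ValueError (excluded by Pre_),
-- modeled by getD 0 here.
def digital_root (n : Int) : Int :=
  ((PySem.Int.toChars n).map (fun a => (PySem.Int.ofStr? (String.ofList [a])).getD 0)).sum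

-- nom_to_str: "".join(noms[x] for x in str(nom)); missing key (KeyError, excluded by Pre_)
-- modeled by getD "".
def nom_to_str (nom : Int) : String :=
  String.ofList (((PySem.Int.toChars nom).map
    (fun x => (noms.get? (String.ofList [x])).getD "" |>.toList)).flatten)

def cost_trans (str1 str2 : String) : Int :=
  let l1 := str1.toList
  let l2 := str2.toList
  let p : List Char × List Char :=
    if l1.length > l2.length then (l1, List.replicate (l1.length - l2.length) '0' ++ l2)
    else if l2.length > l1.length then (List.replicate (l2.length - l1.length) '0' ++ l1, l2)
    else (l1, l2)
  ((p.1.zip p.2).map (fun xy => if xy.1 ≠ xy.2 then (1 : Int) else 0)).sum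

-- the while-loop; fuel n.toNat + 1 only makes the recursion total (n strictly decreases
-- on every continuing iteration and stays ≥ 0 on Pre_, so the fuel is never exhausted there).
def costSamLoop : Nat → Int → Int → Int
  | 0, _, ret => ret
  | fuel + 1, n, ret =>
    let ret' := ret + 2 * cost_trans "" (nom_to_str n)
    let n2 := digital_root n
    if n2 < n then costSamLoop fuel n2 ret' else ret'

def cost_sam (n : Int) : Int := costSamLoop (n.toNat + 1) n 0

-- ===== PORT B =====
-- LIT table: digit character → number of lit segments.
def litTab : PySem.Dict String Int := PySem.Dict.mk
  [("0", 6), ("1", 2), ("2", 5), ("3", 5), ("4", 4),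
   ("5", 5), ("6", 6), ("7", 4), ("8", 7), ("9", 6)]

-- B's recursion, with the same totality fuel as A's loop (never exhausted on Pre_).
def costSamAltGo : Nat → Int → Int
  | 0, _ => 0
  | fuel + 1, n =>
    let s := PySem.Int.toChars n
    let cost := 2 * (s.map (fun c => (litTab.get? (String.ofList [c])).getD 0)).sum
    let n2 := (s.map (fun c => (PySem.Int.ofStr? (String.ofList [c])).getD 0)).sum
    cost + (if n2 < n then costSamAltGo fuel n2 else 0)

def cost_sam_alt (n : Int) : Int := costSamAltGo (n.toNat + 1) n

-- ===== PRECONDITION & SPEC =====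
-- Pre_: Python A raises KeyError on every negative n ('-' not in noms); it returns on all non-negative n.
def Pre_cost_sam (n : Int) : Prop := 0 ≤ n
instance (n : Int) : Decidable (Pre_cost_sam n) := by unfold Pre_cost_sam; infer_instance
def pvWitness_cost_sam : Int := (19)

def Spec_cost_sam (n : Int) (out : Int) : Prop := out = cost_sam_alt n
instance (n : Int) (out : Int) : Decidable (Spec_cost_sam n out) := by unfold Spec_cost_sam; infer_instance

-- ===== CLAIM (what is proved, stated in full; the proofs are below) =====
def Claim_equal_cost_sam : Prop := ∀ (n : Int), Dom_cost_sam n → Pre_cost_sam n → Spec_cost_sam n (cost_sam n)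

-- ===== LEMMAS AND PROOFS =====

-- per-character cost agreement: counting non-'0' chars of the noms pattern = litTab entry
lemma perChar (c : Char) :
    (((noms.get? (String.ofList [c])).getD "" |>.toList).map
        (fun x => if x ≠ '0' then (1 : Int) else 0)).sum
      = (litTab.get? (String.ofList [c])).getD 0 := by
  by_cases h : c ∈ ['0','1','2','3','4','5','6','7','8','9']
  · fin_cases h <;> decide
  · have hne : ∀ s : String, s ∈ (["0","1","2","3","4","5","6","7","8","9"] : List String) →
        (s == String.ofList [c]) = false := by
      intro s hs
      fin_cases hs <;>
        (rw [beq_eq_false_iff_ne]; intro h2; apply h;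
         have := congrArg String.toList h2; simp at this; simp [← this])
    simp only [noms, litTab, PySem.Dict.get?_mk_cons]
    rw [hne "0" (by simp), hne "1" (by simp), hne "2" (by simp), hne "3" (by simp),
        hne "4" (by simp), hne "5" (by simp), hne "6" (by simp), hne "7" (by simp),
        hne "8" (by simp), hne "9" (by simp)]
    simp [PySem.Dict.get?]

-- the zip against the '0'-padding counts exactly the non-'0' characters
lemma zipRep (l : List Char) :
    (((List.replicate l.length '0').zip l).map (fun xy => if xy.1 ≠ xy.2 then (1 : Int) else 0))
      = l.map (fun x => if x ≠ '0' then (1 : Int) else 0) := by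
  induction l with
  | nil => simp
  | cons a t ih =>
    simp only [List.length_cons, List.replicate_succ, List.zip_cons_cons, List.map_cons, ih]
    by_cases h : a = '0'
    · simp [h]
    · simp [h, Ne.symm h]

lemma cost_trans_empty (l : List Char) :
    cost_trans "" (String.ofList l) = (l.map (fun x => if x ≠ '0' then (1 : Int) else 0)).sum := by
  cases l with
  | nil => simp [cost_trans]
  | cons a t =>
    have h1 : ("" : String).toList = [] := rfl
    simp only [cost_trans, h1, String.toList_ofList]
    rw [if_neg (by simp), if_pos (by simp)]
    simp only [List.length_nil, Nat.sub_zero, List.append_nil]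
    exact congrArg List.sum (zipRep (a :: t))

-- A's per-iteration segment cost equals B's table sum
lemma perIter (n : Int) :
    cost_trans "" (nom_to_str n)
      = ((PySem.Int.toChars n).map (fun c => (litTab.get? (String.ofList [c])).getD 0)).sum := by
  unfold nom_to_str
  rw [cost_trans_empty, List.map_flatten, List.sum_flatten]
  simp only [List.map_map, Function.comp_def, perChar]

-- A's accumulator loop equals B's recursion, at every fuel
lemma loop_eq (fuel : Nat) (n ret : Int) :
    costSamLoop fuel n ret = ret + costSamAltGo fuel n := by
  induction fuel generalizing n ret with
  | zero => simp [costSamLoop, costSamAltGo]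
  | succ f ih =>
    simp only [costSamLoop, costSamAltGo]
    have hdr : digital_root n
        = ((PySem.Int.toChars n).map (fun c => (PySem.Int.ofStr? (String.ofList [c])).getD 0)).sum := rfl
    rw [perIter n, hdr]
    split_ifs with h
    · rw [ih]; ring
    · ring

-- ===== VERDICT (by name: the statement is the Claim_ definition above) =====
theorem cost_sam_spec : Claim_equal_cost_sam := by
  intro n _ _
  unfold Spec_cost_sam cost_sam cost_sam_alt
  simpa using loop_eq (n.toNat + 1) n 0
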